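-- pv_equiv track=rewrite | github.com/arsensahakyan/PythonHomeworks | homework 14.1.py | financialCrisis
-- ===== SOURCE A (Python) =====
-- def financialCrisis(roadRegister):
--     return_val = []
--     for i in range(len(roadRegister)):
--         zipp = list(zip(*roadRegister))
--         zipp.pop(i)
--         for j in range(len(zipp)):
--             zipp[j] = list(zipp[j])
--             zipp[j].pop(i)
--         return_val.append(list(zip(*zipp)))
--     return return_val
-- ===== SOURCE B (Python) =====
-- def financialCrisis(roadRegister):
--     n = len(roadRegister)
--     m = min((len(row) for row in roadRegister), default=0)
--     def minor(i):
--         cols = list(range(i)) + list(range(i + 1, m))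
--         return [tuple(row[c] for c in cols)
--                 for row in roadRegister[:i] + roadRegister[i + 1:]]
--     return [minor(i) for i in range(n)]
-- ===== Notes on version B (the rewrite author's own statement) =====
-- stated objective: simpler
-- what changed: B builds each minor directly by dropping row i and keeping the surviving column indices of the zip-truncated width, instead of A's transpose / pop a column / pop inside every row / re-transpose round trip.
import Mathlib
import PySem

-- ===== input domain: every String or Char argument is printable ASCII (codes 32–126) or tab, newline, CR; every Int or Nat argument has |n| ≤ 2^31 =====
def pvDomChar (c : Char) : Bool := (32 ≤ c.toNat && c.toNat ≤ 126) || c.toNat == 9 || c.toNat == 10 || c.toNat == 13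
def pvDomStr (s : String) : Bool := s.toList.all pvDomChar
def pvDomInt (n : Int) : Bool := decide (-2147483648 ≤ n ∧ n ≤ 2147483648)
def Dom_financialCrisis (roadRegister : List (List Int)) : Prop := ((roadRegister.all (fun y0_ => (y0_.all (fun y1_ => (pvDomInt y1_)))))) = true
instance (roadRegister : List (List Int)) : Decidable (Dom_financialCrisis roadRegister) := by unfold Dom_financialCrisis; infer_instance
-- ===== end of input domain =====

-- B builds each minor directly (drop row i, keep the surviving column indices) instead of
-- A's transpose / pop each column / re-transpose round trip: objective 'simpler'.

-- ===== PORT A =====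
-- zip(*xss) has no PySem primitive; ported by hand: the transpose truncated to the minimum
-- row length (exact: Python's zip stops at the shortest iterable; every index j < that
-- minimum is in range for every row, so getD's default is never used).
def pvZipStar (xss : List (List Int)) : List (List Int) :=
  (List.range (((xss.map List.length).min?).getD 0)).map (fun j => xss.map (fun r => r.getD j 0))

def financialCrisis (roadRegister : List (List Int)) : List (List (List Int)) :=
  (List.range roadRegister.length).foldl (fun return_val i =>
    let zipp := pvZipStar roadRegister
    -- zipp.pop(i): raises IndexError when i ≥ len(zipp); those inputs are excluded by Pre_
    let zipp := zipp.eraseIdx i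
    -- the j-loop: replace every zipp[j] by zipp[j] with index i popped
    let zipp := zipp.map (fun t => t.eraseIdx i)
    return_val ++ [pvZipStar zipp]) []

-- ===== PORT B =====
-- roadRegister[:i] + roadRegister[i+1:] → take/drop (exact: 0 ≤ i); range(i+1, m) →
-- List.range' (i+1) (m-(i+1)); row[c] → getD (exact: c < m ≤ len(row) always, m the minimum row length).
def financialCrisis_alt (roadRegister : List (List Int)) : List (List (List Int)) :=
  let n := roadRegister.length
  let m := ((roadRegister.map List.length).min?).getD 0   -- min(lengths, default=0)
  (List.range n).map (fun i =>
    let cols := List.range i ++ List.range' (i + 1) (m - (i + 1))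
    (roadRegister.take i ++ roadRegister.drop (i + 1)).map
      (fun row => cols.map (fun c => row.getD c 0)))

-- ===== PRECONDITION & SPEC =====
-- Pre_ excludes exactly the inputs on which A raises IndexError: zip truncates the transpose to
-- the shortest row, so zipp.pop(i) fails as soon as i reaches that length, i.e. whenever some
-- row is shorter than the number of rows; on every other input A returns and Pre_ holds.
def Pre_financialCrisis (roadRegister : List (List Int)) : Prop :=
  ∀ r ∈ roadRegister, roadRegister.length ≤ r.length
instance (roadRegister : List (List Int)) : Decidable (Pre_financialCrisis roadRegister) := by
  unfold Pre_financialCrisis; infer_instance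
def pvWitness_financialCrisis : List (List Int) := [[1, 2], [3, 4]]

def Spec_financialCrisis (roadRegister : List (List Int)) (out : List (List (List Int))) : Prop := out = financialCrisis_alt roadRegister
instance (roadRegister : List (List Int)) (out : List (List (List Int))) : Decidable (Spec_financialCrisis roadRegister out) := by unfold Spec_financialCrisis; infer_instance

-- ===== CLAIM (what is proved, stated in full; the proofs are below) =====
def Claim_equal_financialCrisis : Prop := ∀ (roadRegister : List (List Int)), Dom_financialCrisis roadRegister → Pre_financialCrisis roadRegister → Spec_financialCrisis roadRegister (financialCrisis roadRegister)

-- ===== LEMMAS AND PROOFS =====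

-- folding "append one element" over a list is mapping over it
lemma pv_foldl_append {α β : Type} (g : α → β) :
    ∀ (l : List α) (a0 : List β), l.foldl (fun acc x => acc ++ [g x]) a0 = a0 ++ l.map g := by
  intro l
  induction l with
  | nil => simp
  | cons x xs ih => intro a0; simp [List.foldl_cons, ih]

-- erasing index i from range' s n (i < n) splits the range around the value s + i
lemma pv_range'_eraseIdx : ∀ (i s n : Nat), i < n →
    (List.range' s n).eraseIdx i = List.range' s i ++ List.range' (s + i + 1) (n - (i + 1)) := by
  intro i
  induction i with
  | zero =>
    intro s n h
    match n, h with
    | n + 1, _ =>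
      simp only [List.range'_succ, List.eraseIdx_cons_zero, List.range'_zero, List.nil_append]
      norm_num
  | succ i ih =>
    intro s n h
    match n, h with
    | n + 1, h =>
      have hi : i < n := by omega
      simp only [List.range'_succ, List.eraseIdx_cons_succ, ih (s + 1) n hi]
      have h1 : s + 1 + i + 1 = s + (i + 1) + 1 := by omega
      have h2 : n - (i + 1) = n + 1 - (i + 1 + 1) := by omega
      rw [h1, h2]
      simp

lemma pv_range_eraseIdx (i m : Nat) (h : i < m) :
    (List.range m).eraseIdx i = List.range i ++ List.range' (i + 1) (m - (i + 1)) := by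
  rw [List.range_eq_range', pv_range'_eraseIdx i 0 m h, ← List.range_eq_range']
  norm_num

-- mapping g over a list is mapping (g ∘ getD) over its index range
lemma pv_map_range_getD {α β : Type} [Inhabited α] (g : α → β) :
    ∀ (l : List α), (List.range l.length).map (fun k => g (l.getD k default)) = l.map g := by
  intro l
  induction l with
  | nil => simp
  | cons x xs ih =>
    simp only [List.length_cons, List.range_succ_eq_map, List.map_cons, List.map_map]
    refine congrArg₂ _ (by simp [List.getD]) ?_
    simpa [Function.comp, List.getD] using ih

lemma pv_getD_map {α β : Type} (f : α → β) (l : List α) (k : Nat) (d : β) (d' : α)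
    (hk : k < l.length) : (l.map f).getD k d = f (l.getD k d') := by
  simp [List.getD, List.getElem?_map, List.getElem?_eq_getElem hk]

lemma pv_le_min (rr : List (List Int)) (hne : rr ≠ []) (n : Nat)
    (h : ∀ r ∈ rr, n ≤ r.length) : n ≤ ((rr.map List.length).min?).getD 0 := by
  cases hm : (rr.map List.length).min? with
  | none => simp [List.min?_eq_none_iff] at hm; exact absurd hm (by simpa using hne)
  | some m0 =>
    obtain ⟨hmem, -⟩ := List.min?_eq_some_iff.mp hm
    obtain ⟨r, hr, hrl⟩ := List.mem_map.mp hmem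
    simpa [← hrl] using h r hr

lemma pv_min_replicate (k : Nat) (c : Nat) :
    ((List.replicate k c).min?).getD 0 = if k = 0 then 0 else c := by
  cases k with
  | zero => simp
  | succ k =>
    have : (List.replicate (k + 1) c).min? = some c := by
      apply List.min?_eq_some_iff.mpr
      refine ⟨by simp, ?_⟩
      intro b hb; simp [List.eq_of_mem_replicate hb]
    simp [this]

-- the i-th minor computed by A's transpose/pop/transpose equals B's direct construction
lemma pv_minor_eq (rr : List (List Int)) (i : Nat) (hi : i < rr.length)
    (hpre : ∀ r ∈ rr, rr.length ≤ r.length) :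
    pvZipStar (((pvZipStar rr).eraseIdx i).map (fun t => t.eraseIdx i))
    = (rr.take i ++ rr.drop (i + 1)).map (fun row =>
        (List.range i ++ List.range' (i + 1) (((rr.map List.length).min?).getD 0 - (i + 1))).map
          (fun c => row.getD c 0)) := by
  set m := ((rr.map List.length).min?).getD 0 with hm
  have hne : rr ≠ [] := by intro h; simp [h] at hi
  have hnm : rr.length ≤ m := pv_le_min rr hne rr.length hpre
  have him : i < m := lt_of_lt_of_le hi hnm
  set cols := List.range i ++ List.range' (i + 1) (m - (i + 1)) with hcols
  have h1 : ((pvZipStar rr).eraseIdx i).map (fun t => t.eraseIdx i)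
      = cols.map (fun j => (rr.eraseIdx i).map (fun r => r.getD j 0)) := by
    unfold pvZipStar
    rw [← hm, List.eraseIdx_map, pv_range_eraseIdx i m him, ← hcols]
    simp [List.map_map, Function.comp, List.eraseIdx_map]
  rw [h1, ← List.eraseIdx_eq_take_drop_succ]
  unfold pvZipStar
  have hlen : (cols.map (fun j => (rr.eraseIdx i).map (fun r => r.getD j 0))).map List.length
      = List.replicate cols.length (rr.eraseIdx i).length := by
    simp [Function.comp_def, List.map_const']
  have hm2 : (((cols.map (fun j => (rr.eraseIdx i).map (fun r => r.getD j 0))).map List.length).min?).getD 0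
      = (rr.eraseIdx i).length := by
    rw [hlen, pv_min_replicate]
    split_ifs with hc
    · -- cols empty forces a 1×1 matrix, whose minor has 0 rows on both sides
      have hcne : cols.length = i + (m - (i + 1)) := by simp [hcols]
      have hL : (rr.eraseIdx i).length = rr.length - 1 := by
        simp [List.length_eraseIdx, hi]
      omega
    · rfl
  rw [hm2, ← pv_map_range_getD (fun row => cols.map (fun c => row.getD c 0)) (rr.eraseIdx i)]
  apply List.map_congr_left
  intro k hk
  have hk' : k < (rr.eraseIdx i).length := List.mem_range.mp hk
  simp only [List.map_map]
  apply List.map_congr_left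
  intro j hj
  exact pv_getD_map (fun r => r.getD j 0) (rr.eraseIdx i) k 0 default hk'

-- ===== VERDICT (by name: the statement is the Claim_ definition above) =====
theorem financialCrisis_spec : Claim_equal_financialCrisis := by
  intro rr _ hpre
  unfold Spec_financialCrisis
  simp only [financialCrisis, financialCrisis_alt]
  rw [pv_foldl_append (fun i => pvZipStar (((pvZipStar rr).eraseIdx i).map (fun t => t.eraseIdx i)))]
  rw [List.nil_append]
  apply List.map_congr_left
  intro i hi
  exact pv_minor_eq rr i (List.mem_range.mp hi) hpre
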